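-- pv_equiv track=rewrite | github.com/hussainmohd03/log-normalizer | log-normalizer-slm/data/labeling/vendors/trend_micro.py | _extract_mitre_techniques
-- ===== SOURCE A (Python) =====
-- def _extract_mitre_techniques(matched_rules: list) -> list:
--     """Flatten mitreTechniqueIds across all matchedRules → matchedFilters."""
--     seen = set()
--     attacks = []
--     for rule in matched_rules or []:
--         for flt in rule.get("matchedFilters", []):
--             for tech_id in flt.get("mitreTechniqueIds", []):
--                 if tech_id and tech_id not in seen:
--                     seen.add(tech_id)
--                     attacks.append({"technique": {"uid": tech_id}})
--     return attacks
-- ===== SOURCE B (Python) =====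
-- def _extract_mitre_techniques(matched_rules: list) -> list:
--     """Flatten mitreTechniqueIds across all matchedRules -> matchedFilters."""
--     pending = [
--         tech_id
--         for rule in (matched_rules or [])
--         for flt in rule.get("matchedFilters", [])
--         for tech_id in flt.get("mitreTechniqueIds", [])
--         if tech_id
--     ]
--     attacks = []
--     while pending:
--         tech_id = pending[0]
--         attacks.append({"technique": {"uid": tech_id}})
--         pending = [t for t in pending[1:] if t != tech_id]
--     return attacks
-- ===== Notes on version B (the rewrite author's own statement) =====
-- stated objective: alternative
-- what changed: Replaces A's single interleaved pass with a seen-set and accumulator by a flatten phase followed by a membership-free nub loop: repeatedly take the head of the remaining flat id list, emit it, and filter all later copies of it out of the rest; no seen-set exists at all.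
import Mathlib
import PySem

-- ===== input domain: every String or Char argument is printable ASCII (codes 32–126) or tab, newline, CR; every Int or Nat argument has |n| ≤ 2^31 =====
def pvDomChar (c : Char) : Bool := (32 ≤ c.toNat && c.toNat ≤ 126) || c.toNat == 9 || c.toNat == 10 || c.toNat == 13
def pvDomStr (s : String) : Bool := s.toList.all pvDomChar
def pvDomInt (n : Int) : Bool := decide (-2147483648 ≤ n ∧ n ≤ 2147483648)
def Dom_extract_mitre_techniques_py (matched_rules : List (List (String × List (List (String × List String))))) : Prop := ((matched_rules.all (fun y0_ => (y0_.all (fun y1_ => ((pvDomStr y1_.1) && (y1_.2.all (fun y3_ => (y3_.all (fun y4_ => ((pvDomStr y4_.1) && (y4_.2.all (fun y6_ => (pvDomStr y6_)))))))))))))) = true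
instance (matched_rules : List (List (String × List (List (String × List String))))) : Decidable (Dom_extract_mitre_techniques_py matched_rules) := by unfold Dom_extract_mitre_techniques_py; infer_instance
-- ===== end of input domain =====

-- B replaces A's interleaved seen-set pass by a flatten phase plus a membership-free nub loop
-- (emit the head, filter its later copies out of the rest); objective: alternative, same return value.

-- {"technique": {"uid": tech_id}} as an association list (shared literal formatter)
def pvFmt (tech_id : String) : List (String × List (String × String)) :=
  [("technique", [("uid", tech_id)])]

-- ===== PORT A =====
-- literal port of A: one pass, mutable seen set + attacks accumulator
def extract_mitre_techniques_py (matched_rules : List (List (String × List (List (String × List String))))) : List (List (String × List (String × String))) :=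
  ((if matched_rules = [] then [] else matched_rules).foldl
    (fun st rule =>
      ((PySem.Dict.mk rule).getD "matchedFilters" []).foldl
        (fun st flt =>
          ((PySem.Dict.mk flt).getD "mitreTechniqueIds" []).foldl
            (fun st tech_id =>
              if tech_id ≠ "" ∧ ¬ (PySem.Set.contains st.1 tech_id = true) then
                (PySem.Set.add st.1 tech_id, st.2 ++ [pvFmt tech_id])
              else st)
            st)
        st)
    ((PySem.Set.empty : PySem.Set String), ([] : List (List (String × List (String × String)))))).2

-- ===== PORT B =====
-- B's while loop: pop the head, emit it formatted, drop its later copies from the rest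
def pvWhile (pending : List String) : List (List (String × List (String × String))) :=
  match pending with
  | [] => []
  | tech_id :: rest => pvFmt tech_id :: pvWhile (rest.filter (fun t => t ≠ tech_id))
termination_by pending.length
decreasing_by
  simp only [List.length_unattach]
  exact Nat.lt_succ_of_le (le_trans (List.length_filter_le _ _) (le_of_eq (List.length_attach)))

-- literal port of B: flatten (with the truthiness test inside the comprehension), then the nub loop
def extract_mitre_techniques_py_alt (matched_rules : List (List (String × List (List (String × List String))))) : List (List (String × List (String × String))) :=
  pvWhile
    ((if matched_rules = [] then [] else matched_rules).flatMap
      (fun rule => ((PySem.Dict.mk rule).getD "matchedFilters" []).flatMap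
        (fun flt => ((PySem.Dict.mk flt).getD "mitreTechniqueIds" []).filter
          (fun tech_id => tech_id ≠ ""))))

-- ===== PRECONDITION & SPEC =====
def Spec_extract_mitre_techniques_py (matched_rules : List (List (String × List (List (String × List String))))) (out : List (List (String × List (String × String)))) : Prop := out = extract_mitre_techniques_py_alt matched_rules
instance (matched_rules : List (List (String × List (List (String × List String))))) (out : List (List (String × List (String × String)))) : Decidable (Spec_extract_mitre_techniques_py matched_rules out) := by unfold Spec_extract_mitre_techniques_py; infer_instance

-- ===== CLAIM (what is proved, stated in full; the proofs are below) =====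
def Claim_equal_extract_mitre_techniques_py : Prop := ∀ (matched_rules : List (List (String × List (List (String × List String))))), Dom_extract_mitre_techniques_py matched_rules → Spec_extract_mitre_techniques_py matched_rules (extract_mitre_techniques_py matched_rules)

-- ===== LEMMAS AND PROOFS =====

-- equation lemmas for pvWhile (compiled by well-founded recursion)
theorem pvWhile_nil : pvWhile [] = [] := by rw [pvWhile.eq_def]
theorem pvWhile_cons (t : String) (ts : List String) :
    pvWhile (t :: ts) = pvFmt t :: pvWhile (ts.filter (fun x => x ≠ t)) := by rw [pvWhile.eq_def]

-- A's per-id loop body, named for the proofs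
def pvStep (st : PySem.Set String × List (List (String × List (String × String)))) (tech_id : String) :
    PySem.Set String × List (List (String × List (String × String))) :=
  if tech_id ≠ "" ∧ ¬ (PySem.Set.contains st.1 tech_id = true) then
    (PySem.Set.add st.1 tech_id, st.2 ++ [pvFmt tech_id])
  else st

-- folding Set.add only appends
theorem pvFoldlAdd_prefix (l : List String) (s : PySem.Set String) :
    ∃ r, l.foldl PySem.Set.add s = s ++ r := by
  induction l generalizing s with
  | nil => exact ⟨[], by simp⟩
  | cons t ts ih =>
    simp only [List.foldl_cons, PySem.Set.add]
    by_cases h : t ∈ s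
    · simpa [h] using ih s
    · obtain ⟨r, hr⟩ := ih (s ++ [t])
      exact ⟨t :: r, by simp [h, hr]⟩

-- A's interleaved loop over a flat id list, characterised by its filtered seen-set fold
theorem pvLoop_eq (l : List String) (seen : PySem.Set String)
    (attacks : List (List (String × List (String × String)))) :
    l.foldl pvStep (seen, attacks) =
      ((l.filter (fun t => t ≠ "")).foldl PySem.Set.add seen,
       attacks ++ (((l.filter (fun t => t ≠ "")).foldl PySem.Set.add seen).drop seen.length).map pvFmt) := by
  induction l generalizing seen attacks with
  | nil => simp
  | cons t ts ih =>
    by_cases ht : t = ""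
    · simp only [List.foldl_cons, List.filter_cons]
      simp [pvStep, ht, ih]
    · by_cases hc : t ∈ seen
      · simp only [List.foldl_cons, List.filter_cons]
        simp [pvStep, ht, hc, PySem.Set.add, ih]
      · have hadd : PySem.Set.add seen t = seen ++ [t] := by simp [PySem.Set.add, hc]
        have hstep : pvStep (seen, attacks) t = (seen ++ [t], attacks ++ [pvFmt t]) := by
          simp [pvStep, ht, hc]
        simp only [List.foldl_cons, List.filter_cons, ht, decide_true, ne_eq,
          not_false_eq_true, if_pos, hstep, hadd]
        rw [ih]
        obtain ⟨r, hr⟩ := pvFoldlAdd_prefix (ts.filter (fun t => t ≠ "")) (seen ++ [t])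
        refine Prod.ext rfl ?_
        simp only [hr]
        have h1 : ((seen ++ [t]) ++ r).drop (seen ++ [t]).length = r := List.drop_left
        have h2 : (seen ++ ([t] ++ r)).drop seen.length = [t] ++ r := by
          exact List.drop_left
        rw [h1, List.append_assoc seen [t] r, h2]
        simp

-- the seen-set fold equals B's nub loop: new elements appended = pvWhile of what is not yet seen
theorem pvFoldlAdd_eq_while (l : List String) (s : PySem.Set String) :
    ((l.foldl PySem.Set.add s).drop s.length).map pvFmt
      = pvWhile (l.filter (fun t => ¬ t ∈ s)) := by
  induction hn : l.length using Nat.strong_induction_on generalizing l s with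
  | _ n ih =>
    cases l with
    | nil => simp [pvWhile_nil]
    | cons t ts =>
      by_cases hc : t ∈ s
      · have := ih ts.length (by simp [← hn]) ts s rfl
        simp only [List.foldl_cons, List.filter_cons, hc, PySem.Set.add, not_true,
          decide_false, Bool.false_eq_true, if_false]
        simpa [hc] using this
      · have hadd : PySem.Set.add s t = s ++ [t] := by simp [PySem.Set.add, hc]
        have hrec := ih ts.length (by simp [← hn]) ts (s ++ [t]) rfl
        have hfilt : ts.filter (fun t' => ¬ t' ∈ s ++ [t])
            = (ts.filter (fun t' => ¬ t' ∈ s)).filter (fun t' => t' ≠ t) := by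
          rw [List.filter_filter]
          apply List.filter_congr
          intro x _
          by_cases h1 : x = t <;> by_cases h2 : x ∈ s <;> simp [h1, h2, hc]
        simp only [List.foldl_cons, List.filter_cons, hc, not_false_eq_true, decide_true, if_pos,
          hadd]
        rw [pvWhile_cons]
        obtain ⟨r, hr⟩ := pvFoldlAdd_prefix ts (s ++ [t])
        rw [hr]
        have h1 : ((s ++ [t]) ++ r).drop s.length = [t] ++ r := by
          rw [List.append_assoc]; exact List.drop_left
        have h2 : ((s ++ [t]) ++ r).drop (s ++ [t]).length = r := List.drop_left
        rw [h1]
        have := hrec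
        rw [hr, h2] at this
        simp only [List.map_cons, List.singleton_append]
        rw [this, hfilt]

-- the truthiness filter commutes out of the flatten
theorem pvFilter_flatMap {α β : Type} (l : List α) (f : α → List β) (p : β → Bool) :
    (l.flatMap f).filter p = l.flatMap (fun x => (f x).filter p) := by
  induction l with
  | nil => rfl
  | cons x xs ih => simp [List.flatMap_cons, List.filter_append, ih]

-- ===== VERDICT (by name: the statement is the Claim_ definition above) =====
theorem extract_mitre_techniques_py_spec : Claim_equal_extract_mitre_techniques_py := by
  intro mr _
  unfold Spec_extract_mitre_techniques_py extract_mitre_techniques_py extract_mitre_techniques_py_alt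
  rw [show (fun (st : PySem.Set String × List (List (String × List (String × String)))) (tech_id : String) =>
        if tech_id ≠ "" ∧ ¬ (PySem.Set.contains st.1 tech_id = true) then
          (PySem.Set.add st.1 tech_id, st.2 ++ [pvFmt tech_id])
        else st) = pvStep from rfl]
  have hflat :
      ((if mr = [] then [] else mr).flatMap
        (fun rule => ((PySem.Dict.mk rule).getD "matchedFilters" []).flatMap
          (fun flt => (PySem.Dict.mk flt).getD "mitreTechniqueIds" []))).foldl pvStep
        ((PySem.Set.empty : PySem.Set String), ([] : List (List (String × List (String × String))))) =
      (if mr = [] then [] else mr).foldl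
        (fun st rule =>
          ((PySem.Dict.mk rule).getD "matchedFilters" []).foldl
            (fun st flt =>
              ((PySem.Dict.mk flt).getD "mitreTechniqueIds" []).foldl pvStep st)
            st)
        ((PySem.Set.empty : PySem.Set String), []) := by
    simp only [List.foldl_flatMap]
  rw [← hflat, pvLoop_eq]
  simp only [PySem.Set.empty, List.nil_append]
  rw [pvFoldlAdd_eq_while _ []]
  simp only [List.not_mem_nil, not_false_eq_true, decide_true, List.filter_true]
  simp only [pvFilter_flatMap]
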